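-- pv_equiv track=rewrite | github.com/ozkayas/leetcode_solutions | 2165-plates-between-candles/plates-between-candles.py | fillPlateIntervals
-- ===== SOURCE A (Python) =====
-- from typing import List
--
-- def fillPlateIntervals(s:str) -> List[int]:
--     intervals = []
--     lastBucket = []
--     prefixSum = 0
--     for i in range(len(s)):
--
--         if s[i] == "|":
--             lastBucket.append(i)
--
--         # Closing an interval for plates
--         if len(lastBucket) == 2:
--             # If there is some plate between candles
--             platesBetweenCandles = lastBucket[1] - lastBucket[0] -1
--             if platesBetweenCandles > 0:
--                 prefixSum += platesBetweenCandles
--                 intervals.append(lastBucket[:]+[prefixSum])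
--             lastBucket.clear()
--             lastBucket.append(i)
--
--     return intervals
-- ===== SOURCE B (Python) =====
-- def fillPlateIntervals(s: str):
--     # Split on candles: interior segments of the split ARE the plate runs
--     # between consecutive candles; candle positions are rebuilt from lengths.
--     parts = s.split('|')
--     intervals = []
--     pos = len(parts[0])          # position of the first candle (if any)
--     total = 0
--     for seg in parts[1:-1]:      # one segment per consecutive-candle pair
--         nxt = pos + len(seg) + 1
--         if seg:
--             total += len(seg)
--             intervals.append([pos, nxt, total])
--         pos = nxt
--     return intervals
-- ===== Notes on version B (the rewrite author's own statement) =====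
-- stated objective: faster
-- what changed: B abandons A's per-character index scan with its mutable two-slot lastBucket state machine: it splits the string on the candle character once (a single C-level str.split), so the interior segments of the split ARE the plate runs between consecutive candles, and rebuilds candle positions arithmetically from segment lengths while folding over the segments.
import Mathlib
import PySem

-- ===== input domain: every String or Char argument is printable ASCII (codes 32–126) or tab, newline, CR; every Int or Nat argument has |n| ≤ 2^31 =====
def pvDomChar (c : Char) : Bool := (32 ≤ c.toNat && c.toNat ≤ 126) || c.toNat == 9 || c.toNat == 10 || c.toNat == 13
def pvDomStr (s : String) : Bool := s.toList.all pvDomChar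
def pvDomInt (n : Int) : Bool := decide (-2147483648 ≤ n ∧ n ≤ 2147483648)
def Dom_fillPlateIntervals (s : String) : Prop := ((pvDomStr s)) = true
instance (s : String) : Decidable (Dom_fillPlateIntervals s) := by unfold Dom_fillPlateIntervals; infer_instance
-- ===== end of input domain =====

-- B replaces A's per-character state machine by splitting the string on '|' and
-- rebuilding candle positions from the segment lengths (objective: faster in a timing run: one C-level split replaces the per-character Python loop).


-- ===== PORT A =====
-- loop body of A: state = (intervals, lastBucket, prefixSum); lastBucket[0]/[1] are
-- read only when len(lastBucket) == 2, so the in-range getD is exact there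
def fpiStepA (st : List (List Int) × List Int × Int) (p : Int × Char) :
    List (List Int) × List Int × Int :=
  let lastBucket := if p.2 == '|' then st.2.1 ++ [p.1] else st.2.1
  if lastBucket.length == 2 then
    let plates := lastBucket.getD 1 0 - lastBucket.getD 0 0 - 1
    if plates > 0 then
      (st.1 ++ [lastBucket ++ [st.2.2 + plates]], [p.1], st.2.2 + plates)
    else (st.1, [p.1], st.2.2)
  else (st.1, lastBucket, st.2.2)

def fillPlateIntervals (s : String) : List (List Int) :=
  ((PySem.List.enumerate s.toList 0).foldl fpiStepA ([], [], 0)).1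

-- ===== PORT B =====
-- loop body of B: state = (intervals, pos, total); seg = one segment of s.split('|')
def fpiStepB (st : List (List Int) × Int × Int) (seg : List Char) :
    List (List Int) × Int × Int :=
  let nxt := st.2.1 + seg.length + 1
  if !seg.isEmpty then
    (st.1 ++ [[st.2.1, nxt, st.2.2 + seg.length]], nxt, st.2.2 + seg.length)
  else (st.1, nxt, st.2.2)

def fillPlateIntervals_alt (s : String) : List (List Int) :=
  let parts := PySem.Chars.splitOn s.toList ['|']
  let pos : Int := ((PySem.List.pyGet? parts 0).getD []).length
  ((PySem.List.slice parts (some 1) (some (-1))).foldl fpiStepB ([], pos, 0)).1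

-- ===== PRECONDITION & SPEC =====
def Spec_fillPlateIntervals (s : String) (out : List (List Int)) : Prop := out = fillPlateIntervals_alt s
instance (s : String) (out : List (List Int)) : Decidable (Spec_fillPlateIntervals s out) := by unfold Spec_fillPlateIntervals; infer_instance

-- ===== CLAIM (what is proved, stated in full; the proofs are below) =====
def Claim_equal_fillPlateIntervals : Prop := ∀ (s : String), Dom_fillPlateIntervals s → Spec_fillPlateIntervals s (fillPlateIntervals s)

-- ===== LEMMAS AND PROOFS =====

-- proof-only recursive splitter for the one-char separator '|'
def splitBar : List Char → List (List Char)
  | [] => [[]]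
  | c :: rest =>
      if c = '|' then [] :: splitBar rest
      else (c :: (splitBar rest).headI) :: (splitBar rest).tail

theorem splitBar_ne_nil (l : List Char) : splitBar l ≠ [] := by
  cases l with
  | nil => simp [splitBar]
  | cons c rest => by_cases h : c = '|' <;> simp [splitBar, h]

theorem cons_headI_tail_splitBar (l : List Char) :
    (splitBar l).headI :: (splitBar l).tail = splitBar l := by
  cases h : splitBar l with
  | nil => exact absurd h (splitBar_ne_nil l)
  | cons a t => rfl

theorem splitOn_go_eq (fuel : Nat) :
    ∀ (l cur : List Char) (acc : List (List Char)), l.length < fuel →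
      PySem.Chars.splitOn.go ['|'] fuel l cur acc =
        acc.reverse ++ ((cur.reverse ++ (splitBar l).headI) :: (splitBar l).tail) := by
  induction fuel with
  | zero => intro l cur acc h; omega
  | succ n ih =>
    intro l cur acc h
    cases l with
    | nil => simp [PySem.Chars.splitOn.go, splitBar]
    | cons c rest =>
      by_cases hc : c = '|'
      · subst hc
        rw [PySem.Chars.splitOn.go]
        simp only [List.isPrefixOf, BEq.rfl, Bool.true_and, if_true,
          List.length_singleton, List.drop_succ_cons, List.drop_zero]
        rw [ih rest [] (List.reverse cur :: acc) (by simpa using Nat.lt_of_succ_lt_succ h)]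
        simp [splitBar, cons_headI_tail_splitBar]
      · rw [PySem.Chars.splitOn.go]
        have hpf : List.isPrefixOf ['|'] (c :: rest) = false := by
          simp [List.isPrefixOf]
          exact fun h2 => hc h2.symm
        rw [hpf]
        simp only [Bool.false_eq_true, if_false]
        rw [ih rest (c :: cur) acc (by simpa using Nat.lt_of_succ_lt_succ h)]
        simp [splitBar, hc]

theorem splitOn_eq_splitBar (l : List Char) :
    PySem.Chars.splitOn l ['|'] = splitBar l := by
  rw [PySem.Chars.splitOn, splitOn_go_eq (l.length + 1) l [] [] (by omega)]
  simpa using cons_headI_tail_splitBar l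

-- proof-only: B's loop on the segment LENGTHS
def nLoop : List Nat → List (List Int) → Int → Int → List (List Int) × Int × Int
  | [], ints, pos, tot => (ints, pos, tot)
  | k :: t, ints, pos, tot =>
      if 0 < k then nLoop t (ints ++ [[pos, pos + k + 1, tot + k]]) (pos + k + 1) (tot + k)
      else nLoop t ints (pos + k + 1) tot

theorem foldB_eq_nLoop (segs : List (List Char)) :
    ∀ (ints : List (List Int)) (pos tot : Int),
      segs.foldl fpiStepB (ints, pos, tot) = nLoop (segs.map List.length) ints pos tot := by
  induction segs with
  | nil => intro ints pos tot; simp [nLoop]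
  | cons seg t ih =>
    intro ints pos tot
    simp only [List.foldl_cons, List.map_cons, nLoop, fpiStepB]
    by_cases h : seg = []
    · subst h; simp [ih]
    · have h1 : (!seg.isEmpty) = true := by simp [h]
      have h2 : 0 < seg.length := List.length_pos_iff.mpr h
      simp [h1, h2, ih]

-- proof-only: the candle index list and A's interval recursion over it
def candles (l : List Char) (o : Int) : List Int :=
  ((PySem.List.enumerate l o).filter (fun p => p.2 == '|')).map (fun p => p.1)

def fpiCore : List Int → List (List Int) → Int → List (List Int) × Int
  | a :: b :: rest, ints, ps =>
      if b - a - 1 > 0 then fpiCore (b :: rest) (ints ++ [[a, b, ps + (b - a - 1)]]) (ps + (b - a - 1))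
      else fpiCore (b :: rest) ints ps
  | _, ints, ps => (ints, ps)

theorem fpiScan (l : List (Int × Char)) :
    ∀ (ints : List (List Int)) (ps : Int) (lb : List Int), lb.length ≤ 1 →
      (l.foldl fpiStepA (ints, lb, ps)).1 =
        (fpiCore (lb ++ (l.filter (fun p => p.2 == '|')).map (fun p => p.1)) ints ps).1 := by
  induction l with
  | nil =>
    intro ints ps lb hlb
    match lb, hlb with
    | [], _ => simp [fpiCore]
    | [a], _ => simp [fpiCore]
  | cons p tl ih =>
    intro ints ps lb hlb
    by_cases hc : p.2 = '|'
    · match lb, hlb with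
      | [], _ =>
        simp only [List.foldl_cons, fpiStepA, hc, BEq.rfl, if_true]
        simpa [hc] using ih ints ps [p.1] (by simp)
      | [a], _ =>
        simp only [List.foldl_cons, fpiStepA, hc, BEq.rfl, if_true]
        simp only [List.cons_append, List.nil_append, List.length_cons, List.length_nil]
        rw [show ((0 + 1 + 1 : Nat) == 2) = true from rfl]
        simp only [if_true, List.getD, List.getElem?_cons_succ, List.getElem?_cons_zero,
          Option.getD_some]
        simp only [List.filter_cons, hc, BEq.rfl, if_true, List.map_cons, fpiCore]
        split_ifs with h
        · exact ih _ _ [p.1] (by simp)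
        · exact ih _ _ [p.1] (by simp)
    · have hcb : (p.2 == '|') = false := by simp [hc]
      have hlen : Decidable.decide (lb.length = 2) = false := by
        simp; omega
      simp only [List.foldl_cons, fpiStepA, hcb, if_false, Bool.false_eq_true]
      rw [show (lb.length == 2) = Decidable.decide (lb.length = 2) from rfl, hlen]
      simp only [Bool.false_eq_true, if_false, List.filter_cons, hcb]
      exact ih ints ps lb hlb

theorem candles_cons (ch : Char) (rest : List Char) (o : Int) :
    candles (ch :: rest) o =
      if ch = '|' then o :: candles rest (o + 1) else candles rest (o + 1) := by
  by_cases h : ch = '|' <;> simp [candles, PySem.List.enumerate, h]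

theorem fpiCore_cons₂ (a b : Int) (cs : List Int) (ints : List (List Int)) (ps : Int) :
    fpiCore (a :: b :: cs) ints ps =
      if b - a - 1 > 0 then
        fpiCore (b :: cs) (ints ++ [[a, b, ps + (b - a - 1)]]) (ps + (b - a - 1))
      else fpiCore (b :: cs) ints ps := rfl

theorem nLoop_cons (kk : Nat) (t : List Nat) (ints : List (List Int)) (pos tot : Int) :
    nLoop (kk :: t) ints pos tot =
      if 0 < kk then nLoop t (ints ++ [[pos, pos + kk + 1, tot + kk]]) (pos + kk + 1) (tot + kk)
      else nLoop t ints (pos + kk + 1) tot := rfl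

theorem splitBar_exists_cons (l : List Char) :
    ∃ h t, splitBar l = h :: t := by
  cases h : splitBar l with
  | nil => exact absurd h (splitBar_ne_nil l)
  | cons a t => exact ⟨a, t, rfl⟩

theorem fpiCore_eq_nLoop (l : List Char) :
    ∀ (c : Int) (k : Nat) (ints : List (List Int)) (ps : Int),
      (fpiCore (c :: candles l (c + 1 + k)) ints ps).1 =
        (nLoop (((k + (splitBar l).headI.length) :: (splitBar l).tail.map List.length).dropLast)
          ints c ps).1 := by
  induction l with
  | nil => intro c k ints ps; simp [candles, PySem.List.enumerate, fpiCore, splitBar, nLoop]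
  | cons ch rest ih =>
    intro c k ints ps
    obtain ⟨h', t', hst⟩ := splitBar_exists_cons rest
    by_cases hc : ch = '|'
    · subst hc
      have hsb : splitBar ('|' :: rest) = [] :: h' :: t' := by simp [splitBar, hst]
      rw [candles_cons, if_pos rfl, hsb]
      simp only [List.headI, List.tail_cons, List.map_cons, List.length_nil, Nat.add_zero,
        List.dropLast_cons₂]
      rw [fpiCore_cons₂, nLoop_cons,
        show c + 1 + (k : Int) - c - 1 = (k : Int) from by ring,
        show c + 1 + (k : Int) = c + (k : Int) + 1 from by ring]
      have hIH := ih (c + (k : Int) + 1) 0 (ints ++ [[c, c + (k : Int) + 1, ps + (k : Int)]])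
        (ps + (k : Int))
      have hIH' := ih (c + (k : Int) + 1) 0 ints ps
      simp only [hst, List.headI, List.tail_cons, Nat.cast_zero, add_zero, zero_add] at hIH hIH'
      by_cases hk : 0 < k
      · rw [if_pos (by exact_mod_cast hk), if_pos hk]
        exact hIH
      · have hk0 : k = 0 := by omega
        subst hk0
        rw [if_neg (by simp), if_neg (by omega)]
        simpa using hIH'
    · have hsb : splitBar (ch :: rest) = (ch :: h') :: t' := by simp [splitBar, hc, hst]
      rw [candles_cons, if_neg hc, hsb]
      simp only [List.headI, List.tail_cons, List.length_cons]
      have hIH := ih c (k + 1) ints ps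
      simp only [hst, List.headI, List.tail_cons] at hIH
      rw [show k + (h'.length + 1) = k + 1 + h'.length from by omega]
      rw [show c + 1 + (k : Int) + 1 = c + 1 + ((k : Nat) + 1 : Nat) from by push_cast; ring]
      exact hIH

theorem fpiCore_top (l : List Char) :
    ∀ (o : Int) (ints : List (List Int)) (ps : Int),
      (fpiCore (candles l o) ints ps).1 =
        (nLoop (((splitBar l).tail.map List.length).dropLast) ints
          (o + (splitBar l).headI.length) ps).1 := by
  induction l with
  | nil => intro o ints ps; simp [candles, PySem.List.enumerate, fpiCore, splitBar, nLoop]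
  | cons ch rest ih =>
    intro o ints ps
    obtain ⟨h', t', hst⟩ := splitBar_exists_cons rest
    by_cases hc : ch = '|'
    · subst hc
      have hsb : splitBar ('|' :: rest) = [] :: h' :: t' := by simp [splitBar, hst]
      rw [candles_cons, if_pos rfl, hsb]
      simp only [List.headI, List.tail_cons, List.length_nil, Nat.cast_zero, add_zero]
      have hL1 := fpiCore_eq_nLoop rest o 0 ints ps
      simp only [hst, List.headI, List.tail_cons, Nat.cast_zero, add_zero, zero_add] at hL1
      exact hL1
    · have hsb : splitBar (ch :: rest) = (ch :: h') :: t' := by simp [splitBar, hc, hst]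
      rw [candles_cons, if_neg hc, hsb]
      simp only [List.headI, List.tail_cons, List.length_cons]
      have hIH := ih (o + 1) ints ps
      simp only [hst, List.headI, List.tail_cons] at hIH
      rw [show o + ((h'.length : Nat) + 1 : Nat) = o + 1 + (h'.length : Nat) from by push_cast; ring]
      exact hIH

theorem slice_one_neg_one {α : Type} (xs : List α) :
    PySem.List.slice xs (some 1) (some (-1)) = xs.tail.dropLast := by
  cases xs with
  | nil => simp [PySem.List.slice, PySem.List.clampIdx]
  | cons a t =>
    simp [PySem.List.slice, PySem.List.clampIdx, List.dropLast_eq_take]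
    split_ifs <;> omega

theorem pyGet?_zero_splitBar (l : List Char) :
    (PySem.List.pyGet? (splitBar l) 0).getD [] = (splitBar l).headI := by
  cases h : splitBar l with
  | nil => exact absurd h (splitBar_ne_nil l)
  | cons a t => simp [PySem.List.pyGet?, PySem.List.pyIdx?]

-- ===== VERDICT (by name: the statement is the Claim_ definition above) =====
theorem fillPlateIntervals_spec : Claim_equal_fillPlateIntervals := by
  intro s _
  show fillPlateIntervals s = fillPlateIntervals_alt s
  unfold fillPlateIntervals fillPlateIntervals_alt
  rw [fpiScan (PySem.List.enumerate s.toList 0) [] 0 [] (by simp)]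
  simp only [slice_one_neg_one, splitOn_eq_splitBar, foldB_eq_nLoop, pyGet?_zero_splitBar,
    List.nil_append]
  have hA := fpiCore_top s.toList 0 [] 0
  simp only [candles, zero_add] at hA
  rw [hA, List.map_dropLast]
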